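-- pv_equiv track=rewrite | github.com/karim-farhang/ICPC-Problem-Solveing | CodeChef/DNA.py | check
-- ===== SOURCE A (Python) =====
-- def check(A, B):
--     isValid = True
--     for i in range(len(A)):
--         if A[i] == B[i]:
--             return 'invalid'
--         else:
--             if A[i] == 'G' and B[i] == 'C':
--                 pass
--             elif B[i] == 'G' and A[i] == 'C':
--                 pass
--             elif A[i] == 'T' and B[i] == 'A':
--                 pass
--             elif B[i] == 'T' and A[i] == 'A':
--                 pass
--             else:
--                 isValid = False
--             if not isValid:
--                 return 'invalid'
--     return 'valid'
-- ===== SOURCE B (Python) =====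
-- def check(A, B):
--     table = str.maketrans('ATGC', 'TACG')
--     if all(c in 'ATGC' for c in A) and B[:len(A)] == A.translate(table):
--         return 'valid'
--     return 'invalid'
-- ===== Notes on version B (the rewrite author's own statement) =====
-- stated objective: alternative
-- what changed: B replaces A's indexed early-return loop with two whole-string staged passes: validate that every base of A is in 'ATGC', then compare B[:len(A)] against the translate-built complement strand; no per-index branching or early return.
import Mathlib
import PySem

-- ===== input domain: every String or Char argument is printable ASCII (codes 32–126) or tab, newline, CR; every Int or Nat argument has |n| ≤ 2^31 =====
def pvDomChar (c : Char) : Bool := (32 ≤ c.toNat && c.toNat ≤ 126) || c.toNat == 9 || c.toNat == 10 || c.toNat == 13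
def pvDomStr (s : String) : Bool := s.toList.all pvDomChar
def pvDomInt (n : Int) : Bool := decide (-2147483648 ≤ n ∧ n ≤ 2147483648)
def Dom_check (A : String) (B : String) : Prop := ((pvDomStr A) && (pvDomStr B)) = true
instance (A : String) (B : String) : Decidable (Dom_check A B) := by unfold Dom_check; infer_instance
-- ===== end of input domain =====

-- B validates A against 'ATGC' and compares B[:len(A)] with the translate-built complement strand
-- (staged whole-string passes) instead of A's indexed early-return loop; equivalence is about the
-- return value on Pre_check (A raises IndexError outside it, where B returns 'invalid').

-- ===== PORT A =====
-- Literal port of A's indexed loop: fuel counts the remaining iterations, i is the Python index.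
-- The `_, _ => "invalid"` arm is where Python raises IndexError (excluded by Pre_check).
def checkLoop (a b : List Char) (i : Nat) : Nat → String
  | 0 => "valid"
  | fuel + 1 =>
    match PySem.List.pyGet? a (i : Int), PySem.List.pyGet? b (i : Int) with
    | some ai, some bi =>
      if ai == bi then "invalid"
      else
        if ai == 'G' && bi == 'C' then checkLoop a b (i + 1) fuel
        else if bi == 'G' && ai == 'C' then checkLoop a b (i + 1) fuel
        else if ai == 'T' && bi == 'A' then checkLoop a b (i + 1) fuel
        else if bi == 'T' && ai == 'A' then checkLoop a b (i + 1) fuel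
        else "invalid"  -- isValid = False; `if not isValid: return 'invalid'`
    | _, _ => "invalid"

def check (A : String) (B : String) : String :=
  checkLoop A.toList B.toList 0 A.toList.length

-- ===== PORT B =====
-- str.maketrans('ATGC','TACG') + translate = this character map applied to each code point (exact
-- for every char: unmapped chars are left unchanged).
def trChar (c : Char) : Char :=
  if c == 'A' then 'T' else if c == 'T' then 'A'
  else if c == 'G' then 'C' else if c == 'C' then 'G' else c

-- Literal port of Source B: `all(c in 'ATGC' for c in A)`, then `B[:len(A)] == A.translate(table)`.
def check_alt (A : String) (B : String) : String :=
  if A.toList.all (fun c => "ATGC".toList.contains c) &&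
     (PySem.List.slice B.toList none (some (A.toList.length : Int)) == A.toList.map trChar)
  then "valid" else "invalid"

-- ===== PRECONDITION & SPEC =====
def complB (c d : Char) : Bool :=
  (c == 'A' && d == 'T') || (c == 'T' && d == 'A') || (c == 'G' && d == 'C') || (c == 'C' && d == 'G')

-- Pre_ excludes exactly the inputs where Python A raises IndexError: B shorter than A with
-- every pair up to len(B) a complementary base pair (the loop then reads B[len(B)]).
def Pre_check (A : String) (B : String) : Prop :=
  ¬ (B.toList.length < A.toList.length ∧ ∀ p ∈ B.toList.zip A.toList, complB p.2 p.1 = true)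
instance (A : String) (B : String) : Decidable (Pre_check A B) := by unfold Pre_check; infer_instance
def pvWitness_check : String × String := ("GAT", "CTA")


def Spec_check (A : String) (B : String) (out : String) : Prop := out = check_alt A B
instance (A : String) (B : String) (out : String) : Decidable (Spec_check A B out) := by unfold Spec_check; infer_instance

-- ===== CLAIM (what is proved, stated in full; the proofs are below) =====
def Claim_equal_check : Prop := ∀ (A : String) (B : String), Dom_check A B → Pre_check A B → Spec_check A B (check A B)

-- ===== LEMMAS AND PROOFS =====

-- Structural restatement of A's loop over the remaining suffixes (proof helper only).
def checkRec : List Char → List Char → String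
  | [], _ => "valid"
  | _ :: _, [] => "invalid"
  | ai :: xs, bi :: ys =>
      if ai == bi then "invalid"
      else
        if ai == 'G' && bi == 'C' then checkRec xs ys
        else if bi == 'G' && ai == 'C' then checkRec xs ys
        else if ai == 'T' && bi == 'A' then checkRec xs ys
        else if bi == 'T' && ai == 'A' then checkRec xs ys
        else "invalid"

lemma pyGet?_drop (a : List Char) (i : Nat) :
    PySem.List.pyGet? a (i : Int) = (a.drop i).head? := by
  simp [PySem.List.pyGet?_natCast, List.head?_drop]

lemma loop_eq_rec (a b : List Char) (i fuel : Nat) (hf : fuel = (a.drop i).length) :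
    checkLoop a b i fuel = checkRec (a.drop i) (b.drop i) := by
  induction fuel generalizing i with
  | zero =>
    have : a.drop i = [] := List.eq_nil_of_length_eq_zero hf.symm
    simp [checkLoop, this, checkRec]
  | succ fuel ih =>
    cases hda : a.drop i with
    | nil => simp [hda] at hf
    | cons ai xs =>
      have hdaa : a.drop (i + 1) = xs := by
        rw [← List.tail_drop, hda, List.tail_cons]
      have hfx : fuel = xs.length := by simp [hda] at hf; omega
      cases hdb : b.drop i with
      | nil =>
        simp only [checkLoop, pyGet?_drop, hda, hdb, List.head?_cons, List.head?_nil]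
        rfl
      | cons bi ys =>
        have hdbb : b.drop (i + 1) = ys := by
          rw [← List.tail_drop, hdb, List.tail_cons]
        have hrec := ih (i + 1) (by rw [hdaa]; exact hfx)
        rw [hdaa, hdbb] at hrec
        simp only [checkLoop, pyGet?_drop, hda, hdb, List.head?_cons, checkRec, hrec]

-- A's per-position ladder passes exactly when ai is a base and bi is its table complement.
lemma step_chars (ai bi : Char) (r : String) :
    (if ai == bi then "invalid"
     else
       if ai == 'G' && bi == 'C' then r
       else if bi == 'G' && ai == 'C' then r
       else if ai == 'T' && bi == 'A' then r
       else if bi == 'T' && ai == 'A' then r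
       else "invalid") =
    (if "ATGC".toList.contains ai && (bi == trChar ai) then r else "invalid") := by
  by_cases hA : ai = 'A' <;> by_cases hT : ai = 'T' <;> by_cases hG : ai = 'G' <;>
    by_cases hC : ai = 'C' <;>
    by_cases h1 : bi = 'A' <;> by_cases h2 : bi = 'T' <;> by_cases h3 : bi = 'G' <;>
      by_cases h4 : bi = 'C' <;>
    simp_all [trChar]

lemma complB_of (ai bi : Char) (h1 : "ATGC".toList.contains ai = true)
    (h2 : bi = trChar ai) : complB ai bi = true := by
  have hm : ai ∈ "ATGC".toList := by simpa using h1
  fin_cases hm <;> subst h2 <;> decide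

lemma rec_eq_alt (a b : List Char)
    (hpre : ¬ (b.length < a.length ∧ ∀ p ∈ b.zip a, complB p.2 p.1 = true)) :
    checkRec a b =
      (if a.all (fun c => "ATGC".toList.contains c) && (b.take a.length == a.map trChar)
       then "valid" else "invalid") := by
  induction a generalizing b with
  | nil => simp [checkRec]
  | cons ai xs ih =>
    cases b with
    | nil => exact absurd ⟨by simp, by simp⟩ hpre
    | cons bi ys =>
      rw [checkRec, step_chars]
      cases h1 : "ATGC".toList.contains ai with
      | false => simp only [List.all_cons, h1, Bool.false_and]; simp
      | true =>
        cases h2 : (bi == trChar ai) with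
        | false =>
          simp only [List.all_cons, List.map_cons, List.length_cons, List.take_succ_cons,
            List.cons_beq_cons, h2, Bool.false_and, Bool.and_false]
          simp
        | true =>
          have h2' : bi = trChar ai := by simpa using h2
          have hpre' : ¬ (ys.length < xs.length ∧ ∀ p ∈ ys.zip xs, complB p.2 p.1 = true) := by
            intro ⟨hl, hz⟩
            exact hpre ⟨by simpa using hl, by
              intro p hp
              simp [List.zip_cons_cons] at hp
              rcases hp with h | h
              · subst h; exact complB_of ai bi h1 h2'
              · exact hz p h⟩
          rw [ih ys hpre']
          subst h2'
          simp only [List.all_cons, h1, List.map_cons, List.length_cons, List.take_succ_cons,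
            List.cons_beq_cons, beq_self_eq_true, Bool.true_and]
          simp

theorem check_spec : Claim_equal_check := by
  intro A B _ hpre
  unfold Spec_check check check_alt
  rw [loop_eq_rec A.toList B.toList 0 A.toList.length (by simp),
      rec_eq_alt _ _ (by exact hpre), PySem.List.slice_to_natCast]
  simp
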